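-- pv_equiv track=rewrite | github.com/AIR-DISCOVER/FreeAD | FreeWorld/tools/split_dataset.py | map_names_to_split
-- ===== SOURCE A (Python) =====
-- def map_names_to_split(names, train_set, val_set, test_set):
--     # 为每个名字创建对应的映射
--     name_to_split = {}
--     for name in names:
--         if name in train_set:
--             name_to_split[name] = 'train'
--         elif name in val_set:
--             name_to_split[name] = 'val'
--         else:
--             name_to_split[name] = 'test'
--
--     return name_to_split
-- ===== SOURCE B (Python) =====
-- def map_names_to_split(names, train_set, val_set, test_set):
--     # default table plus two override passes (train applied last, so it wins)
--     name_to_split = {name: 'test' for name in names}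
--     name_to_split.update({name: 'val' for name in names if name in val_set})
--     name_to_split.update({name: 'train' for name in names if name in train_set})
--     return name_to_split
-- ===== Notes on version B (the rewrite author's own statement) =====
-- stated objective: alternative
-- what changed: Replaces A's single-pass if/elif/else chain by a default table {name:'test'} plus two dict.update override passes (val, then train so train wins), relying on dict insert-in-place keeping key order.
import Mathlib
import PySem

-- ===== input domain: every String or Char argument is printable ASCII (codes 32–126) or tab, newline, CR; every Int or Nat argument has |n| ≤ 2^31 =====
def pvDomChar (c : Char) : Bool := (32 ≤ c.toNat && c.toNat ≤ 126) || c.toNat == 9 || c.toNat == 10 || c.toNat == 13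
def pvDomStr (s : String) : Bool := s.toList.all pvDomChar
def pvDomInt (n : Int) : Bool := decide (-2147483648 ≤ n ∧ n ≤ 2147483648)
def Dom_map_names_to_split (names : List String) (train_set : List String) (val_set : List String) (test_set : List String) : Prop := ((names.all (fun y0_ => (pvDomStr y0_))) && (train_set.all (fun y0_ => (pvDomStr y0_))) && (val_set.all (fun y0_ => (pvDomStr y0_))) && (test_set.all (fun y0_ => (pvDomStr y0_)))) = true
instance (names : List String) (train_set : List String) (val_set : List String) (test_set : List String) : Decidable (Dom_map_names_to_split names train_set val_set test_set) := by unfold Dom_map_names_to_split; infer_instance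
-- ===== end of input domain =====

-- B replaces A's single-pass if/elif/else chain by a default 'test' table plus two
-- dict.update override passes (val then train, so train wins); same cost, different decomposition.


-- ===== PORT A =====
def map_names_to_split (names : List String) (train_set : List String) (val_set : List String) (test_set : List String) : List (String × String) :=
  let name_to_split : PySem.Dict String String :=
    names.foldl (fun d name =>
      if train_set.contains name then d.insert name "train"
      else if val_set.contains name then d.insert name "val"
      else d.insert name "test") PySem.Dict.empty
  name_to_split.items

-- ===== PORT B =====
def map_names_to_split_alt (names : List String) (train_set : List String) (val_set : List String) (test_set : List String) : List (String × String) :=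
  let name_to_split : PySem.Dict String String :=
    PySem.Dict.ofList (names.map (fun name => (name, "test")))
  let name_to_split := name_to_split.update
    (PySem.Dict.ofList ((names.filter (fun name => val_set.contains name)).map (fun name => (name, "val")))).items
  let name_to_split := name_to_split.update
    (PySem.Dict.ofList ((names.filter (fun name => train_set.contains name)).map (fun name => (name, "train")))).items
  name_to_split.items

-- ===== PRECONDITION & SPEC =====
def Spec_map_names_to_split (names : List String) (train_set : List String) (val_set : List String) (test_set : List String) (out : List (String × String)) : Prop := out = map_names_to_split_alt names train_set val_set test_set
instance (names : List String) (train_set : List String) (val_set : List String) (test_set : List String) (out : List (String × String)) : Decidable (Spec_map_names_to_split names train_set val_set test_set out) := by unfold Spec_map_names_to_split; infer_instance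

-- ===== CLAIM (what is proved, stated in full; the proofs are below) =====
def Claim_equal_map_names_to_split : Prop := ∀ (names : List String) (train_set : List String) (val_set : List String) (test_set : List String), Dom_map_names_to_split names train_set val_set test_set → Spec_map_names_to_split names train_set val_set test_set (map_names_to_split names train_set val_set test_set)

-- ===== LEMMAS AND PROOFS =====

-- the split A assigns to a name
def pvLabel (train_set : List String) (val_set : List String) (name : String) : String :=
  if train_set.contains name then "train" else if val_set.contains name then "val" else "test"

-- an insert loop over pairs whose value is a function of the key: final lookup
theorem pv_getD_foldl_pairs {κ ν : Type} [BEq κ] [LawfulBEq κ] [DecidableEq κ]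
    (v : κ → ν) (ps : List (κ × ν)) (hv : ∀ p ∈ ps, p.2 = v p.1)
    (d : PySem.Dict κ ν) (k : κ) (d0 : ν) :
    (ps.foldl (fun d p => d.insert p.1 p.2) d).getD k d0
      = if k ∈ ps.map Prod.fst then v k else d.getD k d0 := by
  induction ps generalizing d with
  | nil => simp
  | cons p ps ih =>
    simp only [List.foldl_cons, List.map_cons, List.mem_cons]
    rw [ih (fun q hq => hv q (List.mem_cons_of_mem _ hq))]
    rw [PySem.Dict.getD_insert]
    have hp := hv p (List.mem_cons_self ..)
    by_cases h1 : k ∈ ps.map Prod.fst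
    · simp [h1]
    · by_cases h2 : k = p.1 <;> simp [h1, h2, hp]

-- every pair in the result of such a loop still has value v of its key
theorem pv_items_foldl_pairs {κ ν : Type} [BEq κ] [LawfulBEq κ]
    (v : κ → ν) (ps : List (κ × ν)) (hv : ∀ p ∈ ps, p.2 = v p.1)
    (d : PySem.Dict κ ν) (hd : ∀ p ∈ d.items, p.2 = v p.1) :
    ∀ p ∈ (ps.foldl (fun d p => d.insert p.1 p.2) d).items, p.2 = v p.1 := by
  induction ps generalizing d with
  | nil => simpa using hd
  | cons p ps ih =>
    refine ih (fun q hq => hv q (List.mem_cons_of_mem _ hq)) _ ?_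
    intro q hq
    rcases (PySem.Dict.mem_items_insert _ _ _ _).1 hq with h | h
    · subst h; exact hv p (List.mem_cons_self ..)
    · exact hd q h.1

-- updating a set with elements it already has changes nothing
theorem pv_set_update_subset {α : Type} [BEq α] [LawfulBEq α]
    (s : PySem.Set α) (xs : List α) (h : ∀ x ∈ xs, x ∈ s) :
    PySem.Set.update s xs = s := by
  rw [PySem.Set.update_eq_append_filter]
  have : (PySem.Set.ofList xs).filter (fun y => !(PySem.Set.contains s y)) = [] := by
    rw [List.filter_eq_nil_iff]
    intro y hy
    have : y ∈ xs := (PySem.Set.mem_ofList _ _).1 hy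
    simp [PySem.Set.contains, h y this]
  rw [this, List.append_nil]

theorem map_names_to_split_spec : Claim_equal_map_names_to_split := by
  intro names train_set val_set test_set _
  unfold Spec_map_names_to_split map_names_to_split map_names_to_split_alt
  simp only []
  -- name the three dicts
  set label := pvLabel train_set val_set with hlab
  -- A's fold body pushed into a single insert
  have hbody : (fun (d : PySem.Dict String String) name =>
      if train_set.contains name then d.insert name "train"
      else if val_set.contains name then d.insert name "val"
      else d.insert name "test")
      = fun d name => d.insert name (label name) := by
    funext d name
    simp only [hlab, pvLabel]
    split_ifs <;> rfl
  rw [hbody]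
  have hmemof : ∀ (xs : List String) (k : String), k ∈ PySem.Set.ofList xs ↔ k ∈ xs :=
    fun xs k => PySem.Set.mem_ofList xs k
  have hkeys : ∀ (ps : List (String × String)) (d : PySem.Dict String String),
      (ps.foldl (fun d p => d.insert p.1 p.2) d).keys = PySem.Set.update d.keys (ps.map Prod.fst) := by
    intro ps d
    exact PySem.Dict.keys_foldl_insert_key ps Prod.fst (fun _ p => p.2) d
  -- the dicts involved
  set psv := (names.filter (fun name => val_set.contains name)).map (fun name => (name, "val")) with hpsv
  set pst := (names.filter (fun name => train_set.contains name)).map (fun name => (name, "train")) with hpst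
  set dv := PySem.Dict.ofList psv with hdv
  set dt := PySem.Dict.ofList pst with hdt
  suffices h : names.foldl (fun d x => d.insert x (label x)) PySem.Dict.empty
      = ((PySem.Dict.ofList (names.map (fun name => (name, "test")))).update dv.items).update dt.items by
    exact congrArg PySem.Dict.items h
  set dA := names.foldl (fun d x => d.insert x (label x)) PySem.Dict.empty with hdA
  set d1 := PySem.Dict.ofList (names.map (fun name => (name, "test"))) with hd1
  set d2 := d1.update dv.items with hd2
  set d3 := d2.update dt.items with hd3
  -- fold views
  have hAview : dA = (names.map (fun x => (x, label x))).foldl (fun d p => d.insert p.1 p.2) PySem.Dict.empty := by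
    rw [hdA, List.foldl_map]
  have h1view : d1 = (names.map (fun name => (name, "test"))).foldl (fun d p => d.insert p.1 p.2) PySem.Dict.empty := rfl
  have h2view : d2 = dv.items.foldl (fun d p => d.insert p.1 p.2) d1 := rfl
  have h3view : d3 = dt.items.foldl (fun d p => d.insert p.1 p.2) d2 := rfl
  have hvview : dv = psv.foldl (fun d p => d.insert p.1 p.2) PySem.Dict.empty := rfl
  have htview : dt = pst.foldl (fun d p => d.insert p.1 p.2) PySem.Dict.empty := rfl
  -- keys of the building blocks
  have hkA : dA.keys = PySem.Set.ofList names := by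
    rw [hAview, hkeys]
    have h1 : ((names.map fun x => (x, label x)).map Prod.fst) = names := by
      simp [Function.comp_def]
    rw [h1]
    simp [PySem.Dict.keys_empty, PySem.Set.update_nil_left]
  have hk1 : d1.keys = PySem.Set.ofList names := by
    rw [h1view, hkeys]
    have h1 : ((names.map fun x => (x, "test")).map Prod.fst) = names := by simp [Function.comp_def]
    rw [h1]
    simp [PySem.Dict.keys_empty, PySem.Set.update_nil_left]
  have hkv : dv.keys = PySem.Set.ofList (names.filter (fun name => val_set.contains name)) := by
    rw [hvview, hkeys, hpsv]
    have h1 : (((names.filter (fun name => val_set.contains name)).map fun x => (x, "val")).map Prod.fst)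
        = names.filter (fun name => val_set.contains name) := by simp [Function.comp_def]
    rw [h1]
    simp [PySem.Dict.keys_empty, PySem.Set.update_nil_left]
  have hkt : dt.keys = PySem.Set.ofList (names.filter (fun name => train_set.contains name)) := by
    rw [htview, hkeys, hpst]
    have h1 : (((names.filter (fun name => train_set.contains name)).map fun x => (x, "train")).map Prod.fst)
        = names.filter (fun name => train_set.contains name) := by simp [Function.comp_def]
    rw [h1]
    simp [PySem.Dict.keys_empty, PySem.Set.update_nil_left]
  have hitemsmapv : dv.items.map Prod.fst = dv.keys := rfl
  have hitemsmapt : dt.items.map Prod.fst = dt.keys := rfl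
  have hk2 : d2.keys = PySem.Set.ofList names := by
    rw [h2view, hkeys, hitemsmapv, hk1, hkv]
    apply pv_set_update_subset
    intro x hx
    rw [hmemof] at hx ⊢
    exact List.mem_of_mem_filter hx
  have hk3 : d3.keys = PySem.Set.ofList names := by
    rw [h3view, hkeys, hitemsmapt, hk2, hkt]
    apply pv_set_update_subset
    intro x hx
    rw [hmemof] at hx ⊢
    exact List.mem_of_mem_filter hx
  -- values of the building blocks
  have hvals_v : ∀ p ∈ dv.items, p.2 = (fun _ : String => "val") p.1 := by
    rw [hvview]
    exact pv_items_foldl_pairs (fun _ => "val") psv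
      (by intro p hp; rw [hpsv] at hp; rcases List.mem_map.1 hp with ⟨x, _, rfl⟩; rfl)
      PySem.Dict.empty (by intro p hp; simp [PySem.Dict.empty] at hp)
  have hvals_t : ∀ p ∈ dt.items, p.2 = (fun _ : String => "train") p.1 := by
    rw [htview]
    exact pv_items_foldl_pairs (fun _ => "train") pst
      (by intro p hp; rw [hpst] at hp; rcases List.mem_map.1 hp with ⟨x, _, rfl⟩; rfl)
      PySem.Dict.empty (by intro p hp; simp [PySem.Dict.empty] at hp)
  have hgA : ∀ k, dA.getD k "" = if k ∈ names then label k else "" := by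
    intro k
    rw [hAview, pv_getD_foldl_pairs label _ (by
      intro p hp; rcases List.mem_map.1 hp with ⟨x, _, rfl⟩; rfl)]
    have h1 : ((names.map fun x => (x, label x)).map Prod.fst) = names := by simp [Function.comp_def]
    rw [h1]
    simp [PySem.Dict.getD_empty]
  have hg1 : ∀ k, d1.getD k "" = if k ∈ names then "test" else "" := by
    intro k
    rw [h1view, pv_getD_foldl_pairs (fun _ => "test") _ (by
      intro p hp; rcases List.mem_map.1 hp with ⟨x, _, rfl⟩; rfl)]
    have h1 : ((names.map fun x => (x, "test")).map Prod.fst) = names := by simp [Function.comp_def]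
    rw [h1]
    simp [PySem.Dict.getD_empty]
  have hg2 : ∀ k, d2.getD k ""
      = if k ∈ names.filter (fun name => val_set.contains name) then "val" else d1.getD k "" := by
    intro k
    rw [h2view, pv_getD_foldl_pairs (fun _ => "val") _ hvals_v, hitemsmapv, hkv]
    by_cases hx : k ∈ names.filter (fun name => val_set.contains name) <;>
      simp [hx, hmemof]
  have hg3 : ∀ k, d3.getD k ""
      = if k ∈ names.filter (fun name => train_set.contains name) then "train" else d2.getD k "" := by
    intro k
    rw [h3view, pv_getD_foldl_pairs (fun _ => "train") _ hvals_t, hitemsmapt, hkt]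
    by_cases hx : k ∈ names.filter (fun name => train_set.contains name) <;>
      simp [hx, hmemof]
  -- pointwise value agreement on names
  have hval : ∀ k ∈ names, dA.getD k "" = d3.getD k "" := by
    intro k hk
    rw [hgA, if_pos hk, hg3, hg2, hg1, if_pos hk, hlab]
    unfold pvLabel
    by_cases h1 : train_set.contains k <;> by_cases h2 : val_set.contains k <;>
      simp [h1, h2, List.mem_filter, hk]
  -- nodup keys
  have hndA : dA.keys.Nodup := by rw [hkA]; exact PySem.Set.nodup_ofList names
  have hnd3 : d3.keys.Nodup := by rw [hk3]; exact PySem.Set.nodup_ofList names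
  -- assemble
  apply PySem.Dict.ext
  rw [PySem.Dict.items_eq_map_keys dA hndA "", PySem.Dict.items_eq_map_keys d3 hnd3 "", hkA, hk3]
  apply List.map_congr_left
  intro k hk
  rw [hval k ((hmemof names k).1 hk)]
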